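-- pv_equiv track=rewrite | github.com/ankur-bohra/eco-project | gini.py | add_states
-- ===== SOURCE A (Python) =====
-- states_uts = set(
--     [
--         "Andaman and Nicobar Islands",
--         "Andhra Pradesh",
--         "Arunachal Pradesh",
--         "Assam",
--         "Bihar",
--         "Chandigarh",
--         "Chhattisgarh",
--         "Dadra and Nagar Haveli",
--         "Daman and Diu",
--         "Delhi",
--         "Goa",
--         "Gujarat",
--         "Haryana",
--         "Himachal Pradesh",
--         "India",
--         "Jammu and Kashmir",
--         "Jharkhand",
--         "Karnataka",
--         "Kerala",
--         "Lakshadweep",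
--         "Madhya Pradesh",
--         "Maharashtra",
--         "Manipur",
--         "Meghalaya",
--         "Mizoram",
--         "Nagaland",
--         "Odisha",
--         "Pondicherry",
--         "Punjab",
--         "Rajasthan",
--         "Sikkim",
--         "Tamil Nadu",
--         "Telangana",
--         "Tripura",
--         "Uttar Pradesh",
--         "Uttarakhand",
--         "West Bengal",
--     ]
-- )
--
-- def add_states(lines):
--     new_lines = []
--     queue = []
--     state_lines = []
--     for line in lines:
--         if is_district_line(line):
--             queue.append(line)
--         if is_state_ut_line(line) or get_text(line) in states_uts:
--             state_ut = get_text(line)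
--             state_lines.append(line)
--             for queued_line in queue:
--                 queued_line = queued_line.rstrip() + " " + state_ut
--                 new_lines.append(queued_line)
--             queue.clear()
--     return new_lines, state_lines
--
-- def get_text(line):
--     return line.strip("\n,.1234567890 ")
--
-- def is_state_ut_line(line):
--     return line.split()[0].isalpha()
--
-- def is_district_line(line):
--     return line.split()[0].isnumeric()
-- ===== SOURCE B (Python) =====
-- states_uts = set(
--     [
--         "Andaman and Nicobar Islands",
--         "Andhra Pradesh",
--         "Arunachal Pradesh",
--         "Assam",
--         "Bihar",
--         "Chandigarh",
--         "Chhattisgarh",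
--         "Dadra and Nagar Haveli",
--         "Daman and Diu",
--         "Delhi",
--         "Goa",
--         "Gujarat",
--         "Haryana",
--         "Himachal Pradesh",
--         "India",
--         "Jammu and Kashmir",
--         "Jharkhand",
--         "Karnataka",
--         "Kerala",
--         "Lakshadweep",
--         "Madhya Pradesh",
--         "Maharashtra",
--         "Manipur",
--         "Meghalaya",
--         "Mizoram",
--         "Nagaland",
--         "Odisha",
--         "Pondicherry",
--         "Punjab",
--         "Rajasthan",
--         "Sikkim",
--         "Tamil Nadu",
--         "Telangana",
--         "Tripura",
--         "Uttar Pradesh",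
--         "Uttarakhand",
--         "West Bengal",
--     ]
-- )
--
--
-- def get_text(line):
--     return line.strip("\n,.1234567890 ")
--
--
-- def is_state_ut_line(line):
--     return line.split()[0].isalpha()
--
--
-- def is_district_line(line):
--     return line.split()[0].isnumeric()
--
--
-- def add_states(lines):
--     # Single reverse pass with one current_state variable instead of a queue.
--     current_state = None
--     results = []
--     state_lines = []
--     for line in reversed(list(lines)):
--         if is_state_ut_line(line) or get_text(line) in states_uts:
--             current_state = get_text(line)
--             state_lines.append(line)
--         if is_district_line(line) and current_state is not None:
--             results.append(line.rstrip() + " " + current_state)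
--     results.reverse()
--     state_lines.reverse()
--     return results, state_lines
-- ===== Notes on version B (the rewrite author's own statement) =====
-- stated objective: simpler
-- what changed: Replaces A's forward scan with a pending-district queue flushed at each state line by a single reverse pass that carries one current_state variable and tags each district line directly.
import Mathlib
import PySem

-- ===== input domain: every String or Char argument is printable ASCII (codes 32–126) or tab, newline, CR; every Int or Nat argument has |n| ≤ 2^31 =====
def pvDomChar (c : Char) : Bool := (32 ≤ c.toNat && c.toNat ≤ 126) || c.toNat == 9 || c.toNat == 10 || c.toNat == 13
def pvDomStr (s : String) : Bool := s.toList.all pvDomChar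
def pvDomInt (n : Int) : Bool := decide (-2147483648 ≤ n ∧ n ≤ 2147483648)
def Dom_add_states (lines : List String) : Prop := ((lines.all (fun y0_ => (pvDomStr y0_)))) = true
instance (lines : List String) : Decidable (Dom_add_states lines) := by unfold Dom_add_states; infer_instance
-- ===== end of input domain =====

-- B replaces A's queue-and-flush forward scan by a single reverse pass carrying one
-- current-state variable (objective: simpler/alternative; same asymptotic cost).

-- ===== PORT A =====
-- shared module helpers (Source B defines the identical helpers)
def states_uts : PySem.Set String := PySem.Set.ofList
  [ "Andaman and Nicobar Islands", "Andhra Pradesh", "Arunachal Pradesh", "Assam",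
    "Bihar", "Chandigarh", "Chhattisgarh", "Dadra and Nagar Haveli", "Daman and Diu",
    "Delhi", "Goa", "Gujarat", "Haryana", "Himachal Pradesh", "India",
    "Jammu and Kashmir", "Jharkhand", "Karnataka", "Kerala", "Lakshadweep",
    "Madhya Pradesh", "Maharashtra", "Manipur", "Meghalaya", "Mizoram", "Nagaland",
    "Odisha", "Pondicherry", "Punjab", "Rajasthan", "Sikkim", "Tamil Nadu",
    "Telangana", "Tripura", "Uttar Pradesh", "Uttarakhand", "West Bengal" ]

def get_text (line : String) : String := PySem.Str.stripChars line "\n,.1234567890 "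

-- line.split()[0].isalpha(); [0] on an empty split raises IndexError — excluded by Pre_
def is_state_ut_line (line : String) : Bool :=
  match (PySem.Str.split₀ line).head? with
  | some w => PySem.Str.strIsalpha w
  | none => false

-- line.split()[0].isnumeric(); on the printable-ASCII domain isnumeric = isdigit (exact there)
def is_district_line (line : String) : Bool :=
  match (PySem.Str.split₀ line).head? with
  | some w => PySem.Str.strIsdigit w
  | none => false

-- A's loop body: state = (new_lines, queue, state_lines)
def add_states_step (acc : List String × List String × List String) (line : String) :
    List String × List String × List String :=
  let queue := if is_district_line line then acc.2.1 ++ [line] else acc.2.1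
  if is_state_ut_line line || states_uts.contains (get_text line) then
    (acc.1 ++ queue.map (fun q => PySem.Str.rstrip q ++ " " ++ get_text line),
     [], acc.2.2 ++ [line])
  else
    (acc.1, queue, acc.2.2)

def add_states (lines : List String) : List String × List String :=
  let r := lines.foldl add_states_step ([], [], [])
  (r.1, r.2.2)

-- ===== PORT B =====
-- B's loop body: state = (current_state, results, state_lines), lines traversed in reverse
def add_states_alt_step (acc : Option String × List String × List String) (line : String) :
    Option String × List String × List String :=
  let acc :=
    if is_state_ut_line line || states_uts.contains (get_text line) then
      (some (get_text line), acc.2.1, acc.2.2 ++ [line])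
    else acc
  if is_district_line line then
    match acc.1 with
    | some st => (acc.1, acc.2.1 ++ [PySem.Str.rstrip line ++ " " ++ st], acc.2.2)
    | none => acc
  else acc

def add_states_alt (lines : List String) : List String × List String :=
  let r := lines.reverse.foldl add_states_alt_step (none, [], [])
  (r.2.1.reverse, r.2.2.reverse)

-- ===== PRECONDITION & SPEC =====
-- Pre_ excludes exactly the lines with no whitespace-separated token (empty/whitespace-only),
-- on which A's line.split()[0] raises IndexError (B raises there too).
def Pre_add_states (lines : List String) : Prop :=
  ∀ l ∈ lines, PySem.Str.split₀ l ≠ []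
instance (lines : List String) : Decidable (Pre_add_states lines) := by
  unfold Pre_add_states; infer_instance

def pvWitness_add_states : List String :=
  ["1 Nagpur 0.43", "Maharashtra 2", "2 South Goa", "notastate x", "3 Leh"]

def Spec_add_states (lines : List String) (out : List String × List String) : Prop := out = add_states_alt lines
instance (lines : List String) (out : List String × List String) : Decidable (Spec_add_states lines out) := by unfold Spec_add_states; infer_instance

-- ===== CLAIM (what is proved, stated in full; the proofs are below) =====
def Claim_equal_add_states : Prop := ∀ (lines : List String), Dom_add_states lines → Pre_add_states lines → Spec_add_states lines (add_states lines)

-- ===== LEMMAS AND PROOFS =====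

-- B's reverse-foldl, seen as a foldr over the original list
def loopB (ls : List String) : Option String × List String × List String :=
  ls.foldr (fun l a => add_states_alt_step a l) (none, [], [])

theorem loopB_cons (l : String) (ls : List String) :
    loopB (l :: ls) = add_states_alt_step (loopB ls) l := rfl

-- the pending queue q is emitted at ls's first flush line (B's current_state), A's
-- emissions after that point are exactly B's results reversed, and both collect the
-- same state lines
theorem loopA_eq (ls : List String) : ∀ nl q sl : List String,
    (ls.foldl add_states_step (nl, q, sl)).1 =
      nl ++ (match (loopB ls).1 with
             | some st => q.map (fun x => PySem.Str.rstrip x ++ " " ++ st)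
             | none => []) ++ (loopB ls).2.1.reverse
    ∧ (ls.foldl add_states_step (nl, q, sl)).2.2 = sl ++ (loopB ls).2.2.reverse := by
  induction ls with
  | nil => intro nl q sl; simp [loopB]
  | cons l ls ih =>
    intro nl q sl
    rw [List.foldl_cons, loopB_cons]
    by_cases hf : (is_state_ut_line l || states_uts.contains (get_text l)) = true
    · -- l is a flush line
      by_cases hd : is_district_line l = true
      · simp only [add_states_step, add_states_alt_step, hf, hd, if_pos]
        obtain ⟨h1, h2⟩ := ih (nl ++ (q ++ [l]).map (fun x => PySem.Str.rstrip x ++ " " ++ get_text l)) [] (sl ++ [l])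
        refine ⟨?_, ?_⟩
        · rw [h1]; cases hB : (loopB ls).1 <;> simp
        · rw [h2]; simp
      · simp only [add_states_step, add_states_alt_step, hf, hd, if_true, if_false, Bool.false_eq_true]
        obtain ⟨h1, h2⟩ := ih (nl ++ q.map (fun x => PySem.Str.rstrip x ++ " " ++ get_text l)) [] (sl ++ [l])
        refine ⟨?_, ?_⟩
        · rw [h1]; cases hB : (loopB ls).1 <;> simp
        · rw [h2]; simp
    · -- l is not a flush line
      by_cases hd : is_district_line l = true
      · simp only [add_states_step, add_states_alt_step, hf, hd, if_true, if_false, Bool.false_eq_true]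
        obtain ⟨h1, h2⟩ := ih nl (q ++ [l]) sl
        refine ⟨?_, ?_⟩
        · rw [h1]; cases hB : (loopB ls).1 <;> simp [hB]
        · rw [h2]; cases hB : (loopB ls).1 <;> simp
      · simp only [add_states_step, add_states_alt_step, hf, hd, if_false, Bool.false_eq_true]
        exact ih nl q sl

-- ===== VERDICT (by name: the statement is the Claim_ definition above) =====
theorem add_states_spec : Claim_equal_add_states := by
  intro lines _ _
  unfold Spec_add_states add_states add_states_alt
  rw [List.foldl_reverse]
  obtain ⟨h1, h2⟩ := loopA_eq lines [] [] []
  have hB : lines.foldr (fun l a => add_states_alt_step a l) (none, [], []) = loopB lines := rfl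
  rw [hB]
  refine Prod.ext ?_ ?_
  · rw [h1]; cases (loopB lines).1 <;> simp
  · simpa using h2
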